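-- pv_equiv track=rewrite | github.com/srikanthtraining25/test | app/services/ldif/utils.py | is_printable_string
-- ===== SOURCE A (Python) =====
-- def is_printable_string(value: str) -> bool:
--     """Check if a string is printable without encoding."""
--     if not value:
--         return True
--
--     for char in value:
--         code = ord(char)
--         # Check for non-printable ASCII
--         if code < 32 and code not in (9,):  # Allow tab
--             return False
--         if code > 126:
--             return False
--
--     return True
-- ===== SOURCE B (Python) =====
-- import re
--
-- _PRINTABLE_RE = re.compile(r'[\t\x20-\x7e]*')
--
-- def is_printable_string(value: str) -> bool:
--     """Check if a string is printable without encoding."""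
--     return _PRINTABLE_RE.fullmatch(value) is not None
-- ===== Notes on version B (the rewrite author's own statement) =====
-- stated objective: idiomatic
-- what changed: Replaced the explicit character loop with ord() range tests and early returns by a single compiled-regex fullmatch against the character class [\t\x20-\x7e]*.
import Mathlib
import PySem

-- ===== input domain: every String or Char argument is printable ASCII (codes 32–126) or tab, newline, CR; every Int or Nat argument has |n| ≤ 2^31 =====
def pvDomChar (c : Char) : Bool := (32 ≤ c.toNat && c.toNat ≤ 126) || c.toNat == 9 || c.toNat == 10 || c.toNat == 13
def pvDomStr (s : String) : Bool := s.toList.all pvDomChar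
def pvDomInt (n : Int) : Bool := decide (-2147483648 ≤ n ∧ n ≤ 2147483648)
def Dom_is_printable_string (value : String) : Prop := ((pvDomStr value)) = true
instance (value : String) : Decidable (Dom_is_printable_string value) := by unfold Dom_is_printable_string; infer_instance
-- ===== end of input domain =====

-- B replaces A's explicit per-character loop with ord() tests by a regex fullmatch
-- over the class [\t\x20-\x7e]* (idiomatic; same return value on every input).

-- ===== PORT A =====
-- the `for char in value:` loop with its early returns
def pvALoop : List Char → Bool
  | [] => true
  | c :: rest =>
    let code := c.toNat
    if code < 32 && !(code == 9) then false
    else if code > 126 then false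
    else pvALoop rest

def is_printable_string (value : String) : Bool :=
  if value.toList.isEmpty then true   -- `if not value: return True`
  else pvALoop value.toList

-- ===== PORT B =====
-- fullmatch of the char-class regex [\t\x20-\x7e]* holds iff every character is
-- in the class; ported exactly as that membership test over the string.
def pvClassChar (c : Char) : Bool := c == '\t' || (32 ≤ c.toNat && c.toNat ≤ 126)

def is_printable_string_alt (value : String) : Bool :=
  value.toList.all pvClassChar

-- ===== PRECONDITION & SPEC =====
def Spec_is_printable_string (value : String) (out : Bool) : Prop := out = is_printable_string_alt value
instance (value : String) (out : Bool) : Decidable (Spec_is_printable_string value out) := by unfold Spec_is_printable_string; infer_instance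

-- ===== CLAIM (what is proved, stated in full; the proofs are below) =====
def Claim_equal_is_printable_string : Prop := ∀ (value : String), Dom_is_printable_string value → Spec_is_printable_string value (is_printable_string value)

-- ===== LEMMAS AND PROOFS =====

-- ===== VERDICT (by name: the statement is the Claim_ definition above) =====
theorem pvALoop_eq_all (l : List Char) : pvALoop l = l.all pvClassChar := by
  induction l with
  | nil => rfl
  | cons c rest ih =>
    have htab : (c == '\t') = (c.toNat == 9) := by
      by_cases h : c.toNat = 9
      · have hc : c = '\t' := by
          apply Char.ext
          apply UInt32.toNat_inj.mp
          show Char.toNat c = Char.toNat '\t'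
          rw [h]; rfl
        simp [hc]
      · have hne : c ≠ '\t' := by
          intro he; apply h; rw [he]; rfl
        simp [hne, h]
    simp only [pvALoop, List.all_cons, ← ih, pvClassChar, htab]
    split_ifs with h1 h2 <;> simp_all <;> omega

theorem is_printable_string_spec : Claim_equal_is_printable_string := by
  intro value _
  unfold Spec_is_printable_string is_printable_string is_printable_string_alt
  rw [pvALoop_eq_all]
  cases value.toList <;> simp
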